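-- pv_equiv track=rewrite | github.com/sam-byron/babylm-baseline | test_truncation_debugging.py | extract_last_real_token
-- ===== SOURCE A (Python) =====
-- SPECIALS = {"[CLS]", "[SEP]", "[PAD]", "[MASK]"}
--
-- def extract_last_real_token(text_tokens):
--     """Return last non-special token string or None.
--     text_tokens: list of raw whitespace tokens (already stripped)
--     """
--     for tok_ in reversed(text_tokens):
--         tt = tok_.strip()
--         if not tt:
--             continue
--         if tt.upper() in SPECIALS:
--             continue
--         return tok_
--     return None
-- ===== SOURCE B (Python) =====
-- SPECIALS = {"[CLS]", "[SEP]", "[PAD]", "[MASK]"}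
--
-- def _qualifies(tok):
--     tt = tok.strip()
--     return bool(tt) and tt.upper() not in SPECIALS
--
-- def extract_last_real_token(text_tokens):
--     result = None
--     for tok_ in text_tokens:
--         if _qualifies(tok_):
--             result = tok_
--     return result
-- ===== Notes on version B (the rewrite author's own statement) =====
-- stated objective: alternative
-- what changed: A scans the reversed list and early-returns at the first qualifying token; B makes a single forward pass keeping an accumulator that is overwritten by each qualifying token and returned at the end.
import Mathlib
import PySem

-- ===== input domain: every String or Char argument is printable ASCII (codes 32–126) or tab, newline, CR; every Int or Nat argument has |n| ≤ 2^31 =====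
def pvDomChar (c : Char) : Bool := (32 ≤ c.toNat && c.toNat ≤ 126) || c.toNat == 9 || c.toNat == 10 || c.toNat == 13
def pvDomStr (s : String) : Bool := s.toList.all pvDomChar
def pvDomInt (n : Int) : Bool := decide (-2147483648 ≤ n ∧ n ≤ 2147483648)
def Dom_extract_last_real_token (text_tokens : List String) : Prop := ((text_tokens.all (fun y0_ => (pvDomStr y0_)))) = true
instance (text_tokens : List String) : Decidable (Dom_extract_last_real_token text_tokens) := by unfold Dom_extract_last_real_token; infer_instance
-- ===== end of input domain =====

-- B is the same task as a forward single pass with an accumulator instead of A's reversed scan with early return (objective: alternative decomposition).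

-- ===== PORT A =====
def pvSPECIALS : List String := ["[CLS]", "[SEP]", "[PAD]", "[MASK]"]

-- the 'for tok_ in reversed(text_tokens)' loop with early return, as structural recursion
def pvALoop : List String → Option String
  | [] => none
  | tok_ :: rest =>
    let tt := PySem.Str.strip tok_
    if tt = "" then pvALoop rest
    else if pvSPECIALS.contains (PySem.Str.upper tt) then pvALoop rest
    else some tok_

def extract_last_real_token (text_tokens : List String) : Option String :=
  pvALoop text_tokens.reverse

-- ===== PORT B =====
def pvQualifies (tok : String) : Bool :=
  let tt := PySem.Str.strip tok
  tt ≠ "" && !(pvSPECIALS.contains (PySem.Str.upper tt))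

def extract_last_real_token_alt (text_tokens : List String) : Option String :=
  text_tokens.foldl (fun result tok_ => if pvQualifies tok_ then some tok_ else result) none

-- ===== PRECONDITION & SPEC =====
def Spec_extract_last_real_token (text_tokens : List String) (out : Option String) : Prop := out = extract_last_real_token_alt text_tokens
instance (text_tokens : List String) (out : Option String) : Decidable (Spec_extract_last_real_token text_tokens out) := by unfold Spec_extract_last_real_token; infer_instance

-- ===== CLAIM (what is proved, stated in full; the proofs are below) =====
def Claim_equal_extract_last_real_token : Prop := ∀ (text_tokens : List String), Dom_extract_last_real_token text_tokens → Spec_extract_last_real_token text_tokens (extract_last_real_token text_tokens)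

-- ===== LEMMAS AND PROOFS =====

-- A's reversed-scan loop is find? of the qualifying predicate
theorem pvALoop_eq_find? (ys : List String) : pvALoop ys = ys.find? pvQualifies := by
  induction ys with
  | nil => rfl
  | cons t rest ih =>
    simp only [pvALoop, List.find?, pvQualifies]
    by_cases h1 : PySem.Str.strip t = ""
    · simp [h1, ih]
    · by_cases h2 : PySem.Str.upper (PySem.Str.strip t) ∈ pvSPECIALS
      · simp [h1, h2, ih]
      · simp [h1, h2]

-- B's forward fold computes the last qualifying token: find? on the reverse, falling back to the accumulator
theorem pvFoldl_eq_find?_reverse (xs : List String) (acc : Option String) :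
    xs.foldl (fun result tok_ => if pvQualifies tok_ then some tok_ else result) acc
      = (xs.reverse.find? pvQualifies).or acc := by
  induction xs generalizing acc with
  | nil => rfl
  | cons t rest ih =>
    simp only [List.foldl_cons, ih, List.reverse_cons, List.find?_append]
    by_cases h : pvQualifies t
    · simp [List.find?, h]
    · simp [List.find?, h]

-- ===== VERDICT (by name: the statement is the Claim_ definition above) =====
theorem extract_last_real_token_spec : Claim_equal_extract_last_real_token := by
  intro xs _
  unfold Spec_extract_last_real_token extract_last_real_token extract_last_real_token_alt
  rw [pvALoop_eq_find?, pvFoldl_eq_find?_reverse, Option.or_none]
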